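-- pv_equiv track=rewrite | github.com/Erakla/habitica-python-tools | QuestRecommendation/single_run.py | determine_best_stat_quest
-- ===== SOURCE A (Python) =====
-- def determine_best_stat_quest(party_quests):
--     best_quest = ''
--     for quest in party_quests:
--         party_quests[quest]['stat_improvement_sum'] = 0
--         for elem in party_quests[quest]['stat_advantage']:
--             party_quests[quest]['stat_improvement_sum'] += elem[1]
--         if party_quests[quest]['stat_improvement_sum']:
--             if best_quest == '':
--                 best_quest = quest
--             elif party_quests[best_quest]['stat_improvement_sum'] < party_quests[quest]['stat_improvement_sum']:
--                 best_quest = quest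
--     return best_quest, 'new best item belonging to stat bonuses'
-- ===== SOURCE B (Python) =====
-- def determine_best_stat_quest(party_quests):
--     for quest in party_quests:
--         party_quests[quest]['stat_improvement_sum'] = sum(
--             elem[1] for elem in party_quests[quest]['stat_advantage'])
--     ranked = sorted((party_quests[q]['stat_improvement_sum']
--                      for q in party_quests
--                      if party_quests[q]['stat_improvement_sum']),
--                     reverse=True)
--     if ranked:
--         best_quest = next(q for q in party_quests
--                           if party_quests[q]['stat_improvement_sum'] == ranked[0])
--     else:
--         best_quest = ''
--     return best_quest, 'new best item belonging to stat bonuses'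
-- ===== Notes on version B (the rewrite author's own statement) =====
-- stated objective: alternative
-- what changed: Replaces A's single stateful scan (sentinel best_quest plus running comparisons) by a staged sort-based selection: store every quest's stat sum, sort the nonzero sums descending, take the top value, then return the first quest achieving it.
-- intended difference: When the quest named '' has a nonzero stat sum strictly above every earlier nonzero sum and at least every later one, and a later nonzero quest exists, A's '' sentinel collides with the quest name so A returns the first maximal later quest, while B returns '' itself, the quest with the best sum, which is the intended value. — e.g. on determine_best_stat_quest([("", [("stat_advantage", [("str", 2)])]), ("a", [("stat_advantage", [("str", 1)])])]): A returns ("a", "new best item belonging to stat bonuses"), B returns ("", "new best item belonging to stat bonuses")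
import Mathlib
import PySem

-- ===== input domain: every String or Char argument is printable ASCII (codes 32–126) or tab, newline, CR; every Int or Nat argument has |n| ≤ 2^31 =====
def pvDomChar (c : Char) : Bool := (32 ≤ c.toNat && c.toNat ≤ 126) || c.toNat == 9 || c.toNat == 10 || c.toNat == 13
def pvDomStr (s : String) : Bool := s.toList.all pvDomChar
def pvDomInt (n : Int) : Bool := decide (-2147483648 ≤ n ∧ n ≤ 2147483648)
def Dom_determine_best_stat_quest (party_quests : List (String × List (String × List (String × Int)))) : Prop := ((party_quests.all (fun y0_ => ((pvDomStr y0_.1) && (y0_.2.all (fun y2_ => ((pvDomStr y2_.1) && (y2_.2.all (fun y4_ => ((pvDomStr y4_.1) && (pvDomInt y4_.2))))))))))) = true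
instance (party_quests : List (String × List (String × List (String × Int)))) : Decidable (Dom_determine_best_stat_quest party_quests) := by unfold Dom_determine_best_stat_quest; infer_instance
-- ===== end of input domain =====

-- B replaces A's single stateful scan (sentinel best_quest plus running comparisons against the
-- mutated 'stat_improvement_sum' field) by staged sort-based selection: store every quest's stat sum,
-- sort the nonzero sums descending, take the top value, then return the first quest achieving it
-- (objective: alternative; the sort costs O(q log q) where A scans once).
-- Both A and B mutate each inner dict identically (writing 'stat_improvement_sum'); the theorems
-- are about the return value.

-- the per-quest stat sum: sum(e[1] for e in d['stat_advantage']) (first-match lookup; Pre_ gives nodup keys)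
def pvStatSum (p : String × List (String × List (String × Int))) : Int :=
  ((PySem.Dict.mk p.2).getD "stat_advantage" []).foldl (fun acc e => acc + e.2) 0

-- ===== PORT A =====
-- loop state: (best_quest, the written 'stat_improvement_sum' fields keyed by quest)
def pvAStep (st : String × PySem.Dict String Int)
    (p : String × List (String × List (String × Int))) : String × PySem.Dict String Int :=
  let s := pvStatSum p
  let sums := st.2.insert p.1 s
  if sums.getD p.1 0 ≠ 0 then
    if st.1 = "" then (p.1, sums)
    else if sums.getD st.1 0 < sums.getD p.1 0 then (p.1, sums)
    else (st.1, sums)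
  else (st.1, sums)

def determine_best_stat_quest (party_quests : List (String × List (String × List (String × Int)))) : String × String :=
  ((party_quests.foldl pvAStep ("", PySem.Dict.empty)).1,
   "new best item belonging to stat bonuses")

-- ===== PORT B =====
def determine_best_stat_quest_alt (party_quests : List (String × List (String × List (String × Int)))) : String × String :=
  -- entries: each quest with its stored 'stat_improvement_sum'; ranked = sorted((... if sum), reverse=True)
  match PySem.List.sorted (((party_quests.map (fun p => (p.1, pvStatSum p))).map Prod.snd).filter
      (fun s => s != 0)) (fun s => s) true with
  | [] => ("", "new best item belonging to stat bonuses")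
  | m :: _ =>
    -- next(q for q in party_quests if ... == ranked[0]); the top value is attained, so next() succeeds
    match (party_quests.map (fun p => (p.1, pvStatSum p))).find? (fun p => p.2 == m) with
    | some p => (p.1, "new best item belonging to stat bonuses")
    | none => ("", "new best item belonging to stat bonuses")

-- ===== PRECONDITION & SPEC =====
-- Pre_ excludes duplicate dict keys (outer quest names, or keys inside a quest's dict), on which the
-- assoc-list dict convention (first match) and a Python dict (last write) diverge, and quests whose
-- dict lacks 'stat_advantage', on which A raises KeyError (B raises there too).
def Pre_determine_best_stat_quest (party_quests : List (String × List (String × List (String × Int)))) : Prop :=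
  (party_quests.map Prod.fst).Nodup ∧
  ∀ p ∈ party_quests, (p.2.map Prod.fst).Nodup ∧ "stat_advantage" ∈ p.2.map Prod.fst
instance (party_quests : List (String × List (String × List (String × Int)))) : Decidable (Pre_determine_best_stat_quest party_quests) := by unfold Pre_determine_best_stat_quest; infer_instance

def pvWitness_determine_best_stat_quest : (List (String × List (String × List (String × Int)))) :=
  [("a", [("stat_advantage", [("str", 2)])])]

-- On inputs where, among the quests with nonzero stat sum, the one named "" strictly beats every
-- earlier sum, at least ties every later sum, and is not the last, A's '' sentinel collides with the
-- quest name: A returns the first maximal later quest, while B returns '' itself, the quest with the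
-- best stat sum — the intended value.
def D_determine_best_stat_quest (party_quests : List (String × List (String × List (String × Int)))) : Prop :=
  (let w := (party_quests.filter (pvStatSum · != 0)).span (not ∘ String.isEmpty ∘ Prod.fst)
   w.2.head?.any fun x => !w.2.tail.isEmpty && w.1.all (pvStatSum · < pvStatSum x)
     && w.2.tail.all (pvStatSum · ≤ pvStatSum x)) = true
instance (party_quests : List (String × List (String × List (String × Int)))) : Decidable (D_determine_best_stat_quest party_quests) := by unfold D_determine_best_stat_quest; infer_instance

def Spec_determine_best_stat_quest (party_quests : List (String × List (String × List (String × Int)))) (out : String × String) : Prop := ¬ D_determine_best_stat_quest party_quests → out = determine_best_stat_quest_alt party_quests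
instance (party_quests : List (String × List (String × List (String × Int)))) (out : String × String) : Decidable (Spec_determine_best_stat_quest party_quests out) := by unfold Spec_determine_best_stat_quest; infer_instance

def pvDiffWitness_determine_best_stat_quest : (List (String × List (String × List (String × Int)))) :=
  [("", [("stat_advantage", [("str", 2)])]), ("a", [("stat_advantage", [("str", 1)])])]

def pvDiffWitnessOut_determine_best_stat_quest : (String × String) × (String × String) :=
  (("a", "new best item belonging to stat bonuses"), ("", "new best item belonging to stat bonuses"))

-- ===== CLAIM (what is proved, stated in full; the proofs are below) =====
def Claim_unchanged_determine_best_stat_quest : Prop := ∀ (party_quests : List (String × List (String × List (String × Int)))), Dom_determine_best_stat_quest party_quests → Pre_determine_best_stat_quest party_quests → Spec_determine_best_stat_quest party_quests (determine_best_stat_quest party_quests)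
def Claim_changed_determine_best_stat_quest : Prop := Dom_determine_best_stat_quest (pvDiffWitness_determine_best_stat_quest) ∧ Pre_determine_best_stat_quest (pvDiffWitness_determine_best_stat_quest) ∧ D_determine_best_stat_quest (pvDiffWitness_determine_best_stat_quest) ∧ determine_best_stat_quest (pvDiffWitness_determine_best_stat_quest) = pvDiffWitnessOut_determine_best_stat_quest.1 ∧ determine_best_stat_quest_alt (pvDiffWitness_determine_best_stat_quest) = pvDiffWitnessOut_determine_best_stat_quest.2 ∧ pvDiffWitnessOut_determine_best_stat_quest.1 ≠ pvDiffWitnessOut_determine_best_stat_quest.2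
def Claim_exact_determine_best_stat_quest : Prop := ∀ (party_quests : List (String × List (String × List (String × Int)))), Dom_determine_best_stat_quest party_quests → Pre_determine_best_stat_quest party_quests → D_determine_best_stat_quest party_quests → determine_best_stat_quest party_quests ≠ determine_best_stat_quest_alt party_quests

-- ===== LEMMAS AND PROOFS =====

-- the quest keys with their nonzero stat sums, in order (the only data the selection depends on)
def pvNZ (party_quests : List (String × List (String × List (String × Int)))) : List (String × Int) :=
  (party_quests.map (fun p => (p.1, pvStatSum p))).filter (fun p => p.2 != 0)

-- pvDQ, restated on the nonzero key/sum list
def pvDN (l : List (String × Int)) : Bool :=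
  match l.dropWhile (fun p => p.1 != "") with
  | [] => false
  | x :: s => !s.isEmpty && (l.takeWhile (fun p => p.1 != "")).all (fun y => y.2 < x.2)
      && s.all (fun y => y.2 ≤ x.2)

-- A's loop on the nonzero-sum key/sum list (zero-sum quests are skipped by the truthiness test)
def goA : String → Int → List (String × Int) → String
  | b, _, [] => b
  | b, sb, (q, s) :: t =>
    if b = "" then goA q s t
    else if sb < s then goA q s t else goA b sb t

-- the running leftmost-max fold
def mxf : (String × Int) → List (String × Int) → (String × Int)
  | m, [] => m
  | m, c :: t => mxf (if m.2 < c.2 then c else m) t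

-- the leftmost maximal entry's key (proof-side abstraction of both selections)
def pvBQ : List (String × Int) → String
  | [] => ""
  | c :: t => (mxf c t).1

theorem mxf_append (P S : List (String × Int)) (m : String × Int) :
    mxf m (P ++ S) = mxf (mxf m P) S := by
  induction P generalizing m with
  | nil => simp [mxf]
  | cons c t ih => simp [mxf, ih]

theorem mxf_mem (t : List (String × Int)) (m : String × Int) :
    mxf m t = m ∨ mxf m t ∈ t := by
  induction t generalizing m with
  | nil => simp [mxf]
  | cons c t ih =>
    simp only [mxf]
    rcases ih (if m.2 < c.2 then c else m) with h | h
    · rw [h]; split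
      · right; simp
      · left; rfl
    · right; simp [h]

theorem mxf_ge_init (t : List (String × Int)) (m : String × Int) :
    m.2 ≤ (mxf m t).2 := by
  induction t generalizing m with
  | nil => simp [mxf]
  | cons c t ih =>
    simp only [mxf]
    refine le_trans ?_ (ih _)
    split <;> omega

theorem mxf_ge_mem (t : List (String × Int)) (m x : String × Int) (hx : x ∈ t) :
    x.2 ≤ (mxf m t).2 := by
  induction t generalizing m with
  | nil => simp at hx
  | cons c t ih =>
    simp only [mxf]
    rcases List.mem_cons.mp hx with h | h
    · subst h
      refine le_trans ?_ (mxf_ge_init _ _)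
      split <;> omega
    · exact ih _ h

theorem mxf_keep (t : List (String × Int)) (m : String × Int)
    (h : ∀ q ∈ t, q.2 ≤ m.2) : mxf m t = m := by
  induction t with
  | nil => simp [mxf]
  | cons c t ih =>
    have hc : c.2 ≤ m.2 := h c (by simp)
    simp only [mxf]
    rw [if_neg (by omega)]
    exact ih (fun q hq => h q (by simp [hq]))

theorem mxf_drop (t : List (String × Int)) (a b : String × Int)
    (hba : b.2 ≤ a.2) (h : ∃ q ∈ t, a.2 < q.2) : mxf a t = mxf b t := by
  induction t generalizing a b with
  | nil => simp at h
  | cons c t ih =>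
    obtain ⟨q, hq, hlt⟩ := h
    simp only [mxf]
    by_cases hc : a.2 < c.2
    · rw [if_pos hc, if_pos (by omega)]
    · rw [if_neg hc]
      have hcle : c.2 ≤ a.2 := by omega
      have hqt : q ∈ t := by
        rcases List.mem_cons.mp hq with h | h
        · subst h; omega
        · exact h
      split
      · exact ih a c (by omega) ⟨q, hqt, hlt⟩
      · exact ih a b hba ⟨q, hqt, hlt⟩

theorem mxf_strict (t : List (String × Int)) (m : String × Int) (h : mxf m t ≠ m) :
    m.2 < (mxf m t).2 := by
  induction t generalizing m with
  | nil => simp [mxf] at h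
  | cons c t ih =>
    simp only [mxf] at h ⊢
    by_cases hc : m.2 < c.2
    · rw [if_pos hc] at h ⊢
      exact lt_of_lt_of_le hc (mxf_ge_init t c)
    · rw [if_neg hc] at h ⊢
      exact ih m h

theorem goA_ne (t : List (String × Int)) : ∀ (b : String) (sb : Int), b ≠ "" →
    "" ∉ t.map Prod.fst → goA b sb t = (mxf (b, sb) t).1 := by
  induction t with
  | nil => intro b sb hb _; simp [goA, mxf]
  | cons c t ih =>
    intro b sb hb hne
    obtain ⟨q, s⟩ := c
    simp only [List.map_cons, List.mem_cons] at hne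
    push_neg at hne
    obtain ⟨hq, hne⟩ := hne
    simp only [goA, mxf, if_neg hb]
    by_cases hlt : sb < s
    · rw [if_pos hlt, if_pos hlt, ih q s (by simpa using (Ne.symm hq)) hne]
    · rw [if_neg hlt, if_neg hlt, ih b sb hb hne]

theorem goA_append (P : List (String × Int)) : ∀ (b : String) (sb : Int) (rest : List (String × Int)),
    b ≠ "" → "" ∉ P.map Prod.fst →
    goA b sb (P ++ rest) = goA (mxf (b, sb) P).1 (mxf (b, sb) P).2 rest := by
  induction P with
  | nil => intro b sb rest _ _; simp [mxf]
  | cons c t ih =>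
    intro b sb rest hb hne
    obtain ⟨q, s⟩ := c
    simp only [List.map_cons, List.mem_cons] at hne
    push_neg at hne
    obtain ⟨hq, hne⟩ := hne
    simp only [List.cons_append, goA, mxf, if_neg hb]
    by_cases hlt : sb < s
    · rw [if_pos hlt, if_pos hlt, ih q s rest (by simpa using (Ne.symm hq)) hne]
    · rw [if_neg hlt, if_neg hlt, ih b sb rest hb hne]

theorem goA_mem (t : List (String × Int)) : ∀ (b : String) (sb : Int),
    goA b sb t = b ∨ goA b sb t ∈ t.map Prod.fst := by
  induction t with
  | nil => intro b sb; left; rfl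
  | cons c t ih =>
    intro b sb
    obtain ⟨q, s⟩ := c
    simp only [goA, List.map_cons]
    by_cases hb : b = ""
    · rw [if_pos hb]
      rcases ih q s with h | h
      · right; simp [h]
      · right; simp [h]
    · rw [if_neg hb]
      by_cases hlt : sb < s
      · rw [if_pos hlt]
        rcases ih q s with h | h
        · right; simp [h]
        · right; simp [h]
      · rw [if_neg hlt]
        rcases ih b sb with h | h
        · left; exact h
        · right; simp [h]

-- mxf from a nonempty prefix lands on a prefix key (never "")
theorem mxf_fst_mem (p1 : String × Int) (P' : List (String × Int)) :
    (mxf p1 P').1 = p1.1 ∨ (mxf p1 P').1 ∈ P'.map Prod.fst := by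
  rcases mxf_mem P' p1 with h | h
  · left; rw [h]
  · right; exact List.mem_map_of_mem h

-- A-side reduction through the prefix before the "" quest, when "" strictly beats it
theorem goA_red (P S : List (String × Int)) (s0 : Int)
    (hP0 : "" ∉ P.map Prod.fst) (hP : ∀ p ∈ P, p.2 < s0) :
    goA "" 0 (P ++ ("", s0) :: S) = goA "" s0 S := by
  cases P with
  | nil => simp [goA]
  | cons p1 P' =>
    obtain ⟨q, s⟩ := p1
    simp only [List.map_cons, List.mem_cons] at hP0
    push_neg at hP0
    obtain ⟨hq, hP0⟩ := hP0
    have h1 : goA "" 0 ((q, s) :: (P' ++ ("", s0) :: S)) = goA q s (P' ++ ("", s0) :: S) := by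
      simp [goA]
    rw [show ((q, s) :: P') ++ ("", s0) :: S = (q, s) :: (P' ++ ("", s0) :: S) from rfl, h1,
      goA_append P' q s _ (by simpa using (Ne.symm hq)) hP0]
    set M := mxf (q, s) P' with hM
    have hM1 : M.1 ≠ "" := by
      rcases mxf_fst_mem (q, s) P' with h | h
      · rw [h]; simpa using (Ne.symm hq)
      · intro hc; rw [hc] at h; exact hP0 h
    have hM2 : M.2 < s0 := by
      rcases mxf_mem P' (q, s) with h | h
      · rw [hM, h]; exact hP ⟨q, s⟩ (by simp)
      · exact hP M (by simp [List.mem_cons, hM ▸ h])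
    simp only [goA, if_neg hM1, if_pos hM2]

-- B-side reduction through the same prefix
theorem pvBQ_red (P S : List (String × Int)) (s0 : Int)
    (hP : ∀ p ∈ P, p.2 < s0) :
    pvBQ (P ++ ("", s0) :: S) = (mxf ("", s0) S).1 := by
  cases P with
  | nil => simp [pvBQ]
  | cons p1 P' =>
    simp only [List.cons_append, pvBQ]
    rw [mxf_append]
    set M := mxf p1 P' with hM
    have hM2 : M.2 < s0 := by
      rcases mxf_mem P' p1 with h | h
      · rw [hM, h]; exact hP p1 (by simp)
      · exact hP M (by simp [List.mem_cons, hM ▸ h])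
    simp only [mxf, if_pos hM2]

-- the case with no "" key at all: A's loop is the leftmost max
theorem goA_no_empty (N : List (String × Int)) (h : "" ∉ N.map Prod.fst) :
    goA "" 0 N = pvBQ N := by
  cases N with
  | nil => rfl
  | cons c t =>
    obtain ⟨q, s⟩ := c
    simp only [List.map_cons, List.mem_cons] at h
    push_neg at h
    obtain ⟨hq, ht⟩ := h
    simp only [goA, pvBQ]
    exact goA_ne t q s (by simpa using (Ne.symm hq)) ht

-- the prefix-dominates case: some quest before "" already holds a sum ≥ the "" quest's
theorem core_prefix (P S : List (String × Int)) (v : Int)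
    (hP0 : "" ∉ P.map Prod.fst) (hS0 : "" ∉ S.map Prod.fst)
    (hex : ∃ pm ∈ P, v ≤ pm.2) :
    goA "" 0 (P ++ ("", v) :: S) = pvBQ (P ++ ("", v) :: S) := by
  obtain ⟨pm, hpm, hpmge⟩ := hex
  cases P with
  | nil => simp at hpm
  | cons p1 P' =>
    obtain ⟨q1, sv1⟩ := p1
    simp only [List.map_cons, List.mem_cons] at hP0
    push_neg at hP0
    obtain ⟨hq1, hP0⟩ := hP0
    simp only [List.cons_append, goA, pvBQ]
    rw [goA_append P' q1 sv1 _ (by simpa using (Ne.symm hq1)) hP0, mxf_append]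
    set M := mxf (q1, sv1) P' with hM
    have hM1 : M.1 ≠ "" := by
      rcases mxf_fst_mem (q1, sv1) P' with h | h
      · rw [h]; simpa using (Ne.symm hq1)
      · intro hc; rw [hc] at h; exact hP0 h
    have hM2 : ¬ (M.2 < v) := by
      have hle : v ≤ M.2 := by
        rcases List.mem_cons.mp hpm with h | h
        · refine le_trans hpmge ?_
          have : pm.2 = sv1 := congrArg Prod.snd h
          rw [this, hM]
          exact mxf_ge_init _ _
        · exact le_trans hpmge (hM ▸ mxf_ge_mem P' (q1, sv1) _ h)
      omega
    simp only [goA, mxf, if_neg hM1, if_neg hM2]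
    exact goA_ne S M.1 M.2 hM1 hS0

-- head of a dropWhile fails the predicate
theorem dropWhile_head_false {α : Type} (q : α → Bool) (l : List α) (x : α) (s : List α)
    (h : l.dropWhile q = x :: s) : q x = false := by
  induction l with
  | nil => simp [List.dropWhile] at h
  | cons a t ih =>
    rw [List.dropWhile_cons] at h
    split at h
    · exact ih h
    · cases h
      simpa using ‹¬ q x = true›

-- the core: outside pvDN, A's loop picks the leftmost maximum
theorem core (N : List (String × Int)) (hnd : (N.map Prod.fst).Nodup)
    (hD : pvDN N = false) : goA "" 0 N = pvBQ N := by
  rcases hr : N.dropWhile (fun p => p.1 != "") with _ | ⟨x, S⟩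
  · -- no "" key
    apply goA_no_empty
    intro hc
    obtain ⟨p, hp, hp1⟩ := List.mem_map.mp hc
    have := List.dropWhile_eq_nil_iff.mp hr p hp
    simp [hp1] at this
  · have hx1 : x.1 = "" := by
      have := dropWhile_head_false (fun p => p.1 != "") N x S hr
      simpa using this
    set P := N.takeWhile (fun p => p.1 != "") with hPdef
    have hsplit : P ++ x :: S = N := by
      rw [hPdef, ← hr, List.takeWhile_append_dropWhile]
    have hPkeys : ∀ y ∈ P, y.1 ≠ "" := by
      intro y hy
      have := List.mem_takeWhile_imp hy
      simpa using this
    have hP0 : "" ∉ P.map Prod.fst := by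
      intro hc
      obtain ⟨y, hy, hy1⟩ := List.mem_map.mp hc
      exact hPkeys y hy hy1
    have hnd' : ((P ++ x :: S).map Prod.fst).Nodup := hsplit ▸ hnd
    rw [List.map_append, List.map_cons, List.nodup_append] at hnd'
    have hS0 : "" ∉ S.map Prod.fst := by
      have := (List.nodup_cons.mp hnd'.2.1).1
      rw [hx1] at this
      exact this
    have hx : x = ("", x.2) := by rw [← hx1]
    rw [← hsplit, hx]
    by_cases hex : ∃ pm ∈ P, x.2 ≤ pm.2
    · exact core_prefix P S x.2 hP0 hS0 hex
    · push_neg at hex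
      -- every prefix sum is < x.2
      cases S with
      | nil =>
        rw [goA_red P [] x.2 hP0 hex, pvBQ_red P [] x.2 hex]
        simp [goA, mxf]
      | cons s1 S' =>
        -- S nonempty: ¬ pvDN forces a later sum above x.2
        have hSgt : ∃ q2 ∈ s1 :: S', x.2 < q2.2 := by
          by_contra hcon
          push_neg at hcon
          have : pvDN N = true := by
            simp only [pvDN, hr, ← hPdef]
            simp only [List.isEmpty_cons, Bool.not_false, Bool.true_and,
              Bool.and_eq_true, List.all_eq_true, decide_eq_true_eq]
            constructor
            · intro y hy; exact hex y hy
            · intro y hy; exact hcon y hy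
          rw [this] at hD; cases hD
        rw [goA_red P (s1 :: S') x.2 hP0 hex, pvBQ_red P (s1 :: S') x.2 hex]
        obtain ⟨q2, hq2, hq2gt⟩ := hSgt
        obtain ⟨qk, qs⟩ := s1
        simp only [List.map_cons, List.mem_cons] at hS0
        push_neg at hS0
        obtain ⟨hqk, hS0⟩ := hS0
        have hred : goA "" x.2 ((qk, qs) :: S') = goA qk qs S' := by simp [goA]
        rw [hred, goA_ne S' qk qs (by simpa using (Ne.symm hqk)) hS0]
        simp only [mxf]
        by_cases hlt : x.2 < qs
        · rw [if_pos hlt]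
        · rw [if_neg hlt]
          have hq2S' : q2 ∈ S' := by
            rcases List.mem_cons.mp hq2 with h | h
            · exfalso
              have : q2.2 = qs := congrArg Prod.snd h
              omega
            · exact h
          rw [mxf_drop S' ("", x.2) (qk, qs) (by simpa using not_lt.mp hlt) ⟨q2, hq2S', hq2gt⟩]

-- A's dict-carrying fold equals goA on the nonzero key/sum list
theorem foldA (t : List (String × List (String × List (String × Int)))) :
    ∀ (b : String) (sb : Int) (sums : PySem.Dict String Int),
    (t.map Prod.fst).Nodup →
    (b ≠ "" → b ∉ t.map Prod.fst ∧ sums.getD b 0 = sb) →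
    (t.foldl pvAStep (b, sums)).1 =
      goA b sb ((t.map (fun p => (p.1, pvStatSum p))).filter (fun p => p.2 != 0)) := by
  induction t with
  | nil => intro b sb sums _ _; simp [goA]
  | cons p t ih =>
    intro b sb sums hnd hb
    simp only [List.map_cons, List.nodup_cons] at hnd
    obtain ⟨hp1, hnd⟩ := hnd
    simp only [List.foldl_cons, List.map_cons, List.filter_cons]
    by_cases hs : pvStatSum p = 0
    · have hstep : pvAStep (b, sums) p = (b, sums.insert p.1 (pvStatSum p)) := by
        simp [pvAStep, PySem.Dict.getD_insert_self, hs]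
      rw [hstep, if_neg (by simp [hs])]
      refine ih b sb _ hnd (fun hbne => ?_)
      obtain ⟨hmem, hget⟩ := hb hbne
      simp only [List.map_cons, List.mem_cons] at hmem
      push_neg at hmem
      exact ⟨hmem.2, by rw [PySem.Dict.getD_insert_of_ne _ _ _ hmem.1, hget]⟩
    · rw [if_pos (by simp [hs])]
      by_cases hbe : b = ""
      · subst hbe
        have hstep : pvAStep ("", sums) p = (p.1, sums.insert p.1 (pvStatSum p)) := by
          simp [pvAStep, PySem.Dict.getD_insert_self, hs]
        rw [hstep]
        simp only [goA, if_pos rfl]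
        exact ih p.1 (pvStatSum p) _ hnd
          (fun _ => ⟨hp1, PySem.Dict.getD_insert_self _ _ _ _⟩)
      · obtain ⟨hmem, hget⟩ := hb hbe
        simp only [List.map_cons, List.mem_cons] at hmem
        push_neg at hmem
        obtain ⟨hbp, hmem⟩ := hmem
        have hget' : (sums.insert p.1 (pvStatSum p)).getD b 0 = sb := by
          rw [PySem.Dict.getD_insert_of_ne _ _ _ hbp, hget]
        by_cases hlt : sb < pvStatSum p
        · have hstep : pvAStep (b, sums) p = (p.1, sums.insert p.1 (pvStatSum p)) := by
            simp [pvAStep, PySem.Dict.getD_insert_self, hs, hbe, hget', hlt]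
          rw [hstep]
          simp only [goA, if_neg hbe, if_pos hlt]
          exact ih p.1 (pvStatSum p) _ hnd
            (fun _ => ⟨hp1, PySem.Dict.getD_insert_self _ _ _ _⟩)
        · have hstep : pvAStep (b, sums) p = (b, sums.insert p.1 (pvStatSum p)) := by
            simp [pvAStep, PySem.Dict.getD_insert_self, hs, hbe, hget', hlt]
          rw [hstep]
          simp only [goA, if_neg hbe, if_neg hlt]
          exact ih b sb _ hnd (fun _ => ⟨hmem, hget'⟩)

theorem portA_eq (pq : List (String × List (String × List (String × Int))))
    (h : (pq.map Prod.fst).Nodup) :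
    determine_best_stat_quest pq = (goA "" 0 (pvNZ pq), "new best item belonging to stat bonuses") := by
  unfold determine_best_stat_quest pvNZ
  rw [foldA pq "" 0 PySem.Dict.empty h (fun hc => absurd rfl hc)]

-- the first element carrying the running maximum's value is the running maximum itself
theorem find_mxf (t : List (String × Int)) : ∀ (m : String × Int),
    List.find? (fun p => p.2 == (mxf m t).2) (m :: t) = some (mxf m t) := by
  induction t with
  | nil => intro m; simp [mxf, List.find?]
  | cons c t ih =>
    intro m
    simp only [mxf]
    by_cases hc : m.2 < c.2
    · rw [if_pos hc]
      have hle : c.2 ≤ (mxf c t).2 := mxf_ge_init t c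
      rw [List.find?_cons_of_neg (by simp; omega)]
      exact ih c
    · rw [if_neg hc]
      by_cases he : mxf m t = m
      · rw [he, List.find?_cons_of_pos (by simp)]
      · have hlt := mxf_strict t m he
        rw [List.find?_cons_of_neg (by simp; omega)]
        have hq : mxf m t ∈ t := by
          rcases mxf_mem t m with h | h
          · exact absurd h he
          · exact h
        rw [mxf_drop t m c (by omega) ⟨mxf m t, hq, hlt⟩]
        exact ih c

-- find? over a filter whose predicate the matcher implies
theorem find?_filter_of_imp {α : Type} (l : List α) (p q : α → Bool)
    (h : ∀ a, p a = true → q a = true) : (l.filter q).find? p = l.find? p := by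
  induction l with
  | nil => rfl
  | cons a t ih =>
    by_cases hq : q a = true
    · rw [List.filter_cons_of_pos hq]
      by_cases hp : p a = true
      · rw [List.find?_cons_of_pos hp, List.find?_cons_of_pos hp]
      · rw [List.find?_cons_of_neg hp, List.find?_cons_of_neg hp, ih]
    · rw [List.filter_cons_of_neg hq]
      have hp : ¬ p a = true := fun hpa => hq (h a hpa)
      rw [List.find?_cons_of_neg hp, ih]

-- head of the descending sort of the sums is the maximal sum
theorem sorted_head_max (c : String × Int) (t : List (String × Int)) (m : Int) (r : List Int)
    (hs : PySem.List.sorted ((c :: t).map Prod.snd) (fun s => s) true = m :: r) :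
    m = (mxf c t).2 := by
  have hge : ∀ y ∈ (c :: t).map Prod.snd, y ≤ m := by
    intro y hy
    exact PySem.List.key_head_sorted_rev_ge _ _ hs y hy
  have h1 : (mxf c t).2 ≤ m := by
    apply hge
    rcases mxf_mem t c with h | h
    · rw [h]; simp
    · exact List.mem_map_of_mem (List.mem_cons_of_mem c h)
  have h2 : m ≤ (mxf c t).2 := by
    have hm : m ∈ (c :: t).map Prod.snd := by
      have : m ∈ PySem.List.sorted ((c :: t).map Prod.snd) (fun s => s) true := by
        rw [hs]; simp
      exact (PySem.List.mem_sorted _ _ _ _).mp this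
    obtain ⟨y, hy, hy2⟩ := List.mem_map.mp hm
    rcases List.mem_cons.mp hy with h | h
    · rw [← hy2, h]; exact mxf_ge_init t c
    · rw [← hy2]; exact mxf_ge_mem t c y h
  omega

theorem portB_eq (pq : List (String × List (String × List (String × Int)))) :
    determine_best_stat_quest_alt pq = (pvBQ (pvNZ pq), "new best item belonging to stat bonuses") := by
  unfold determine_best_stat_quest_alt
  have hfm : ((pq.map (fun p => (p.1, pvStatSum p))).map Prod.snd).filter (fun s => s != 0)
      = (pvNZ pq).map Prod.snd := by
    simp only [pvNZ, List.filter_map, List.map_map]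
    rfl
  rw [hfm]
  cases hN : pvNZ pq with
  | nil =>
    simp [pvBQ, PySem.List.sorted]
  | cons c t =>
    rcases hs : PySem.List.sorted ((c :: t).map Prod.snd) (fun s => s) true with _ | ⟨m, r⟩
    · exfalso
      have hp := PySem.List.sorted_perm ((c :: t).map Prod.snd) (fun s => s) true
      rw [hs] at hp
      have := hp.length_eq
      simp at this
    · have hm : m = (mxf c t).2 := sorted_head_max c t m r hs
      have hm0 : m ≠ 0 := by
        have hmem : m ∈ (c :: t).map Prod.snd := by
          have : m ∈ PySem.List.sorted ((c :: t).map Prod.snd) (fun s => s) true := by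
            rw [hs]; simp
          exact (PySem.List.mem_sorted _ _ _ _).mp this
        obtain ⟨y, hy, hy2⟩ := List.mem_map.mp hmem
        have h2 : y ∈ pvNZ pq := by rw [hN]; exact hy
        have hynz := (List.mem_filter.mp (show y ∈ List.filter (fun p => p.2 != 0)
          (pq.map (fun p => (p.1, pvStatSum p))) from h2)).2
        rw [← hy2]
        simpa using hynz
      have hfind : List.find? (fun p => p.2 == m) (pq.map (fun p => (p.1, pvStatSum p)))
          = some (mxf c t) := by
        rw [← find?_filter_of_imp (pq.map (fun p => (p.1, pvStatSum p)))
          (fun p => p.2 == m) (fun p => p.2 != 0)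
          (by intro a ha; simp at ha ⊢; omega)]
        have : (pq.map (fun p => (p.1, pvStatSum p))).filter (fun p => p.2 != 0) = c :: t := hN
        rw [this, hm, find_mxf]
      show (match List.find? (fun p => p.2 == m) (pq.map (fun p => (p.1, pvStatSum p))) with
        | some p => (p.1, "new best item belonging to stat bonuses")
        | none => ("", "new best item belonging to stat bonuses"))
        = (pvBQ (c :: t), "new best item belonging to stat bonuses")
      rw [hfind]
      rfl

-- keys of the nonzero list stay nodup
theorem pvNZ_keys_nodup (pq : List (String × List (String × List (String × Int))))
    (h : (pq.map Prod.fst).Nodup) : ((pvNZ pq).map Prod.fst).Nodup := by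
  have hsub : ((pvNZ pq).map Prod.fst).Sublist
      ((pq.map (fun p => (p.1, pvStatSum p))).map Prod.fst) :=
    List.filter_sublist.map _
  rw [List.map_map] at hsub
  have heq : (pq.map (Prod.fst ∘ fun p => (p.1, pvStatSum p))) = pq.map Prod.fst := by
    simp [Function.comp]
  rw [heq] at hsub
  exact h.sublist hsub


-- the input-side change condition, restated on the nonzero key/sum list
theorem DQ_eq (pq : List (String × List (String × List (String × Int)))) :
    (let w := (pq.filter (pvStatSum · != 0)).span (not ∘ String.isEmpty ∘ Prod.fst)
     w.2.head?.any fun x => !w.2.tail.isEmpty && w.1.all (pvStatSum · < pvStatSum x)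
       && w.2.tail.all (pvStatSum · ≤ pvStatSum x)) = pvDN (pvNZ pq) := by
  have hpred : (not ∘ String.isEmpty ∘ Prod.fst :
      (String × List (String × List (String × Int))) → Bool) = (fun y => y.1 != "") := by
    funext y
    show (!y.1.isEmpty) = (y.1 != "")
    by_cases hy : y.1 = ""
    · rw [hy]; rfl
    · rw [Bool.eq_iff_iff]
      cases hb : y.1.isEmpty
      · simp [hy]
      · exact absurd (String.isEmpty_iff.mp hb) hy
  have hNZ : pvNZ pq = (pq.filter (pvStatSum · != 0)).map (fun p => (p.1, pvStatSum p)) := by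
    simp only [pvNZ, List.filter_map]
    rfl
  have hdrop : (pvNZ pq).dropWhile (fun z => z.1 != "")
      = ((pq.filter (pvStatSum · != 0)).dropWhile (fun y => y.1 != "")).map
        (fun p => (p.1, pvStatSum p)) := by
    rw [hNZ, List.dropWhile_map]
    rfl
  have htake : (pvNZ pq).takeWhile (fun z => z.1 != "")
      = ((pq.filter (pvStatSum · != 0)).takeWhile (fun y => y.1 != "")).map
        (fun p => (p.1, pvStatSum p)) := by
    rw [hNZ, List.takeWhile_map]
    rfl
  show (((pq.filter (pvStatSum · != 0)).span (not ∘ String.isEmpty ∘ Prod.fst)).2.head?.any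
      fun x => !((pq.filter (pvStatSum · != 0)).span (not ∘ String.isEmpty ∘ Prod.fst)).2.tail.isEmpty
        && ((pq.filter (pvStatSum · != 0)).span (not ∘ String.isEmpty ∘ Prod.fst)).1.all
          (pvStatSum · < pvStatSum x)
        && ((pq.filter (pvStatSum · != 0)).span (not ∘ String.isEmpty ∘ Prod.fst)).2.tail.all
          (pvStatSum · ≤ pvStatSum x)) = pvDN (pvNZ pq)
  rw [List.span_eq_takeWhile_dropWhile, hpred]
  rcases hd : (pq.filter (pvStatSum · != 0)).dropWhile (fun y => y.1 != "") with _ | ⟨x, s⟩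
  · simp only [pvDN, hdrop, hd, List.map_nil]
    rfl
  · simp only [pvDN, hdrop, htake, hd, List.map_cons]
    simp only [List.all_map, List.isEmpty_map, Function.comp]
    rfl

-- ===== VERDICT (by name: the statement is the Claim_ definition above) =====
theorem determine_best_stat_quest_spec : Claim_unchanged_determine_best_stat_quest := by
  intro pq _ hPre hD
  show determine_best_stat_quest pq = determine_best_stat_quest_alt pq
  rw [portA_eq pq hPre.1, portB_eq pq]
  have hDf : pvDN (pvNZ pq) = false := by
    unfold D_determine_best_stat_quest at hD
    rw [DQ_eq pq] at hD
    exact eq_false_of_ne_true hD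
  rw [core (pvNZ pq) (pvNZ_keys_nodup pq hPre.1) hDf]

theorem determine_best_stat_quest_changed : Claim_changed_determine_best_stat_quest := by
  unfold Claim_changed_determine_best_stat_quest; decide

theorem determine_best_stat_quest_tight : Claim_exact_determine_best_stat_quest := by
  intro pq _ hPre hD
  rw [portA_eq pq hPre.1, portB_eq pq]
  intro hc
  have h1 : goA "" 0 (pvNZ pq) = pvBQ (pvNZ pq) := congrArg Prod.fst hc
  unfold D_determine_best_stat_quest at hD
  rw [DQ_eq pq] at hD
  set N := pvNZ pq with hNdef
  have hnd : (N.map Prod.fst).Nodup := pvNZ_keys_nodup pq hPre.1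
  rcases hr : N.dropWhile (fun p => p.1 != "") with _ | ⟨x, S⟩
  · rw [pvDN, hr] at hD
    cases hD
  · have hx1 : x.1 = "" := by
      have := dropWhile_head_false (fun p => p.1 != "") N x S hr
      simpa using this
    set P := N.takeWhile (fun p => p.1 != "") with hPdef
    have hsplit : P ++ x :: S = N := by
      rw [hPdef, ← hr, List.takeWhile_append_dropWhile]
    have hPkeys : ∀ y ∈ P, y.1 ≠ "" := by
      intro y hy
      have := List.mem_takeWhile_imp hy
      simpa using this
    have hP0 : "" ∉ P.map Prod.fst := by
      intro hcm
      obtain ⟨y, hy, hy1⟩ := List.mem_map.mp hcm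
      exact hPkeys y hy hy1
    have hnd' : ((P ++ x :: S).map Prod.fst).Nodup := hsplit ▸ hnd
    rw [List.map_append, List.map_cons, List.nodup_append] at hnd'
    have hS0 : "" ∉ S.map Prod.fst := by
      have := (List.nodup_cons.mp hnd'.2.1).1
      rw [hx1] at this
      exact this
    -- unpack pvDN N = true
    rw [pvDN, hr] at hD
    simp only [← hPdef, Bool.and_eq_true, List.all_eq_true, decide_eq_true_eq,
      Bool.not_eq_true', List.isEmpty_eq_false_iff] at hD
    obtain ⟨⟨hSne, hPlt⟩, hSle⟩ := hD
    have hx : x = ("", x.2) := by rw [← hx1]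
    rw [← hsplit, hx] at h1
    rw [goA_red P S x.2 hP0 hPlt, pvBQ_red P S x.2 hPlt] at h1
    rw [mxf_keep S ("", x.2) hSle] at h1
    replace h1 : goA "" x.2 S = "" := h1
    cases S with
    | nil => exact hSne rfl
    | cons s1 S' =>
      obtain ⟨qk, qs⟩ := s1
      have hred : goA "" x.2 ((qk, qs) :: S') = goA qk qs S' := by simp [goA]
      rw [hred] at h1
      simp only [List.map_cons, List.mem_cons] at hS0
      push_neg at hS0
      obtain ⟨hqk, hS0⟩ := hS0
      rcases goA_mem S' qk qs with h | h
      · rw [h1] at h; exact hqk h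
      · rw [h1] at h; exact hS0 h
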